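-- pv_equiv track=rewrite | github.com/GoogleCloudPlatform/oozie-to-airflow | o2a/o2a_libs/functions.py | append_all
-- ===== SOURCE A (Python) =====
-- def append_all(src_str, append, delimiter):
--     """
--     Add the append string into each split sub-strings of the
--     first string(=src=). The split is performed into src string
--     using the delimiter . E.g. appendAll("/a/b/,/c/b/,/c/d/", "ADD", ",")
--     will return /a/b/ADD,/c/b/ADD,/c/d/ADD. A append string with null
--     value is consider as an empty string. A delimiter string with value null
--     is considered as no append in the string.
--     """
--     if not delimiter:
--         return src_str
--     if not append:
--         append = ""
--
--     split_str = src_str.split(delimiter)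
--     appended_list = []
--     for split in split_str:
--         appended_list.append(split + append)
--     return delimiter.join(appended_list)
-- ===== SOURCE B (Python) =====
-- def append_all(src_str, append, delimiter):
--     if not delimiter:
--         return src_str
--     pieces = []
--     i = 0
--     n = len(src_str)
--     d = len(delimiter)
--     while i < n:
--         if src_str.startswith(delimiter, i):
--             pieces.append(append)
--             pieces.append(delimiter)
--             i += d
--         else:
--             pieces.append(src_str[i])
--             i += 1
--     pieces.append(append)
--     return "".join(pieces)
-- ===== Notes on version B (the rewrite author's own statement) =====
-- stated objective: alternative
-- what changed: Replaces split-into-list / loop-append / join with a single left-to-right character scan that emits the append string before each delimiter occurrence and once at the end, building the pieces directly.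
import Mathlib
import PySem

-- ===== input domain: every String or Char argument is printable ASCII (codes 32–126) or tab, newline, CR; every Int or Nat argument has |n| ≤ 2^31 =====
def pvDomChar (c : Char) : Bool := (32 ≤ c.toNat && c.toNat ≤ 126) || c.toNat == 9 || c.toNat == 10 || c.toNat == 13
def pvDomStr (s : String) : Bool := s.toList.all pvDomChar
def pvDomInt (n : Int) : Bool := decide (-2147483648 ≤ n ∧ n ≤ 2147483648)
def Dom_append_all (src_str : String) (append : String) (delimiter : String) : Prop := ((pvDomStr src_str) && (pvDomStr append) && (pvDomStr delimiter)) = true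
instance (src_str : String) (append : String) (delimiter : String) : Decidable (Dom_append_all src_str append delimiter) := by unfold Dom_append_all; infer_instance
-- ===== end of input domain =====

-- B computes the same result with one character-level scan (emit append before each delimiter match and once at the end) instead of split/loop/join.


-- ===== PORT A =====
def append_all (src_str : String) (append : String) (delimiter : String) : String :=
  if delimiter = "" then src_str
  else
    let append := if append = "" then "" else append
    match PySem.Str.split? src_str delimiter with
    | none => src_str   -- unreachable: Str.split? is none only when the separator is "", excluded by the guard
    | some split_str =>
        PySem.Str.join delimiter
          (split_str.foldl (fun acc s => acc ++ [s ++ append]) [])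

-- ===== PORT B =====
-- B's while loop over positions: at each position either the delimiter matches (emit append ++ delimiter,
-- skip its length) or copy one character; after the loop emit append once more. Fuel = remaining length + 1.
def appendScan (sep app : List Char) : Nat → List Char → List Char
  | 0, l => l ++ app
  | _ + 1, [] => app
  | fuel + 1, c :: rest =>
    if sep.isPrefixOf (c :: rest) then
      app ++ sep ++ appendScan sep app fuel (List.drop sep.length (c :: rest))
    else
      c :: appendScan sep app fuel rest

def append_all_alt (src_str : String) (append : String) (delimiter : String) : String :=
  if delimiter = "" then src_str
  else
    String.ofList (appendScan delimiter.toList append.toList (src_str.toList.length + 1) src_str.toList)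

-- ===== PRECONDITION & SPEC =====
def Spec_append_all (src_str : String) (append : String) (delimiter : String) (out : String) : Prop := out = append_all_alt src_str append delimiter
instance (src_str : String) (append : String) (delimiter : String) (out : String) : Decidable (Spec_append_all src_str append delimiter out) := by unfold Spec_append_all; infer_instance

-- ===== CLAIM (what is proved, stated in full; the proofs are below) =====
def Claim_equal_append_all : Prop := ∀ (src_str : String) (append : String) (delimiter : String), Dom_append_all src_str append delimiter → Spec_append_all src_str append delimiter (append_all src_str append delimiter)

-- ===== LEMMAS AND PROOFS =====

-- splitOn.go's accumulator is a reversed prefix of the final result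
theorem splitOn_go_acc (sep : List Char) : ∀ (fuel : Nat) (l cur : List Char) (acc : List (List Char)),
    PySem.Chars.splitOn.go sep fuel l cur acc = acc.reverse ++ PySem.Chars.splitOn.go sep fuel l cur [] := by
  intro fuel
  induction fuel with
  | zero => intro l cur acc; simp [PySem.Chars.splitOn.go]
  | succ n ih =>
    intro l cur acc
    cases l with
    | nil => simp [PySem.Chars.splitOn.go]
    | cons c rest =>
      simp only [PySem.Chars.splitOn.go]
      by_cases hp : sep.isPrefixOf (c :: rest) = true
      · rw [if_pos hp, if_pos hp]
        rw [ih _ _ (cur.reverse :: acc), ih _ _ [cur.reverse]]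
        simp
      · rw [if_neg hp, if_neg hp]
        exact ih _ _ acc

-- splitOn.go never returns the empty list of parts
theorem splitOn_go_ne_nil (sep : List Char) : ∀ (fuel : Nat) (l cur : List Char) (acc : List (List Char)),
    PySem.Chars.splitOn.go sep fuel l cur acc ≠ [] := by
  intro fuel
  induction fuel with
  | zero => intro l cur acc; simp [PySem.Chars.splitOn.go]
  | succ n ih =>
    intro l cur acc
    cases l with
    | nil => simp [PySem.Chars.splitOn.go]
    | cons c rest =>
      simp only [PySem.Chars.splitOn.go]
      by_cases hp : sep.isPrefixOf (c :: rest) = true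
      · rw [if_pos hp]; exact ih _ _ _
      · rw [if_neg hp]; exact ih _ _ _

-- core correspondence: joining the appended split parts = B's single scan
theorem key_lemma (app sep : List Char) (hsep : sep ≠ []) : ∀ (fuel : Nat) (l cur : List Char), l.length ≤ fuel →
    PySem.Chars.join sep ((PySem.Chars.splitOn.go sep fuel l cur []).map (· ++ app)) =
      cur.reverse ++ appendScan sep app fuel l := by
  intro fuel
  induction fuel with
  | zero =>
    intro l cur h
    have : l = [] := List.length_eq_zero_iff.mp (Nat.le_zero.mp h)
    subst this
    simp [PySem.Chars.splitOn.go, appendScan, PySem.Chars.join_singleton]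
  | succ n ih =>
    intro l cur h
    cases l with
    | nil =>
      simp [PySem.Chars.splitOn.go, appendScan, PySem.Chars.join_singleton]
    | cons c rest =>
      simp only [PySem.Chars.splitOn.go, appendScan]
      by_cases hp : sep.isPrefixOf (c :: rest) = true
      · rw [if_pos hp, if_pos hp]
        rw [splitOn_go_acc]
        have h1 : 1 ≤ sep.length := by
          cases sep with | nil => exact absurd rfl hsep | cons _ _ => simp
        have hdrop : (List.drop sep.length (c :: rest)).length ≤ n := by
          simp only [List.length_drop, List.length_cons]
          simp only [List.length_cons] at h
          omega
        obtain ⟨p, parts, hps⟩ : ∃ p parts, PySem.Chars.splitOn.go sep n (List.drop sep.length (c :: rest)) [] [] = p :: parts := by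
          cases hgo : PySem.Chars.splitOn.go sep n (List.drop sep.length (c :: rest)) [] [] with
          | nil => exact absurd hgo (splitOn_go_ne_nil sep n _ [] [])
          | cons p parts => exact ⟨p, parts, rfl⟩
        have hih := ih (List.drop sep.length (c :: rest)) [] hdrop
        rw [hps] at hih ⊢
        simp only [List.reverse_nil, List.nil_append, List.map_cons] at hih
        simp only [List.reverse_cons, List.reverse_nil, List.nil_append, List.singleton_append,
          List.map_cons, PySem.Chars.join_cons_cons]
        rw [hih]
        simp [List.append_assoc]
      · rw [if_neg hp, if_neg hp]
        have hih := ih rest (c :: cur) (by simp only [List.length_cons] at h; omega)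
        rw [hih]
        simp

-- ===== VERDICT (by name: the statement is the Claim_ definition above) =====
theorem append_all_spec : Claim_equal_append_all := by
  intro s app d _
  unfold Spec_append_all append_all append_all_alt
  by_cases hd : d = ""
  · rw [if_pos hd, if_pos hd]
  · rw [if_neg hd, if_neg hd]
    have hdl : d.toList ≠ [] := by simp [hd]
    have happ : (if app = "" then "" else app) = app := by
      by_cases h : app = "" <;> simp [h]
    have hsplit : PySem.Str.split? s d = some ((PySem.Chars.splitOn s.toList d.toList).map String.ofList) := by
      simp [PySem.Str.split?, PySem.Chars.split?, hdl]
    rw [hsplit]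
    simp only [happ]
    apply String.toList_inj.mp
    rw [PySem.List.foldl_append_singleton_eq_map (f := fun t => t ++ app)]
    rw [List.nil_append, PySem.Str.toList_join, String.toList_ofList]
    rw [List.map_map, List.map_map]
    have hmap : ((String.toList ∘ (fun t => t ++ app)) ∘ String.ofList) =
        fun x => x ++ app.toList := by
      funext x
      simp [String.toList_append, String.toList_ofList]
    rw [hmap]
    rw [PySem.Chars.splitOn]
    rw [key_lemma app.toList d.toList hdl (s.toList.length + 1) s.toList [] (Nat.le_succ _)]
    simp
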